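-- pv_equiv track=rewrite | github.com/aiju/bk0011-programs | midiread.py | splitchans
-- ===== SOURCE A (Python) =====
-- def splitchans(l):
-- 	nchan = len(l[0][1])
-- 	chans = [[(tim, m[i]) for tim, m in l] for i in range(nchan)]
-- 	res = []
-- 	for c in chans:
-- 		r = [c[0]]
-- 		to = 0
-- 		for t, n in c[1:]:
-- 			to += t
-- 			if n != r[-1][1]:
-- 				r.append((to, n))
-- 		res.append(r)
-- 	return res
-- ===== SOURCE B (Python) =====
-- def splitchans(l):
--     tim0, m0 = l[0]
--     chans = [([(tim0, n)], n) for n in m0]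
--     to = 0
--     for tim, m in l[1:]:
--         to += tim
--         chans = [(r + [(to, n)], n) if n != last else (r, last)
--                  for (r, last), n in zip(chans, m)]
--     return [r for r, _ in chans]
-- ===== Notes on version B (the rewrite author's own statement) =====
-- stated objective: alternative
-- what changed: Instead of transposing the matrix into per-channel lists and compressing each one in a separate pass, B makes a single row-major pass over the rows, maintaining every channel's (compressed list, last note) pair and one shared running time accumulator.
import Mathlib
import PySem

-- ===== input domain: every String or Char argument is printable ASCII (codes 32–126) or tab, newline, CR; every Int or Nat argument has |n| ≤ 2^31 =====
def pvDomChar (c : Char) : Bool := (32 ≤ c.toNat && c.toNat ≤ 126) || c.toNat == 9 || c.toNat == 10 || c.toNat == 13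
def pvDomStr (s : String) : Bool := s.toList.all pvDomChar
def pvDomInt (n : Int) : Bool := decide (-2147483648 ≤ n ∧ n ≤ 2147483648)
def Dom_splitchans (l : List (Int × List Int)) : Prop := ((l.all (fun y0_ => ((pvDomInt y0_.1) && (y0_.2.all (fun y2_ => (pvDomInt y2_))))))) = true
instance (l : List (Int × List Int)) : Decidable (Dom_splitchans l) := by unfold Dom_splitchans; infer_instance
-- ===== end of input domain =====

-- B fuses A's transpose-then-compress into one row-major pass that keeps all channels' state at once (objective: alternative decomposition, same asymptotic cost).

-- ===== PORT A =====
-- inner-loop body of A: "tacc ~ Python to: to += t; if n != r[-1][1]: r.append((to, n))", state (r, to)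
def stepA (p : List (Int × Int) × Int) (tn : Int × Int) : List (Int × Int) × Int :=
  let tacc := p.2 + tn.1
  (if tn.2 ≠ (PySem.List.pyGetD p.1 (-1) ((0:Int),(0:Int))).2 then p.1 ++ [(tacc, tn.2)] else p.1, tacc)

def splitchans (l : List (Int × List Int)) : List (List (Int × Int)) :=
  let nchan := (PySem.List.pyGetD l 0 ((0:Int), ([]:List Int))).2.length
  let chans := (PySem.List.pyRange 0 (nchan : Int) 1).map
    (fun i => l.map (fun tm => (tm.1, PySem.List.pyGetD tm.2 i 0)))
  chans.foldl (fun res c =>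
    res ++ [((PySem.List.slice c (some 1) none).foldl stepA
              ([PySem.List.pyGetD c 0 ((0:Int),(0:Int))], 0)).1]) []

-- ===== PORT B =====
-- row step of B: advance `tacc`, then update every channel's (compressed list, last note) pair
def stepB (p : List (List (Int × Int) × Int) × Int) (row : Int × List Int) :
    List (List (Int × Int) × Int) × Int :=
  let tacc := p.2 + row.1
  (List.zipWith (fun c n => if n ≠ c.2 then (c.1 ++ [(tacc, n)], n) else c) p.1 row.2, tacc)

def splitchans_alt (l : List (Int × List Int)) : List (List (Int × Int)) :=
  let h := l.headD ((0:Int), ([]:List Int))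
  (((l.drop 1).foldl stepB (h.2.map (fun n => ([(h.1, n)], n)), 0)).1).map Prod.fst

-- ===== PRECONDITION & SPEC =====
-- Pre_ excludes exactly the inputs where A raises IndexError: the empty list (l[0]),
-- and rows shorter than the first row (m[i]).
def Pre_splitchans (l : List (Int × List Int)) : Prop :=
  l ≠ [] ∧ ∀ p ∈ l, (l.headD ((0:Int), ([]:List Int))).2.length ≤ p.2.length
instance (l : List (Int × List Int)) : Decidable (Pre_splitchans l) := by
  unfold Pre_splitchans; infer_instance

def pvWitness_splitchans : (List (Int × List Int)) := [(0, [60, 7]), (3, [60, 9]), (2, [62, 9])]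

def Spec_splitchans (l : List (Int × List Int)) (out : List (List (Int × Int))) : Prop := out = splitchans_alt l
instance (l : List (Int × List Int)) (out : List (List (Int × Int))) : Decidable (Spec_splitchans l out) := by unfold Spec_splitchans; infer_instance

-- ===== CLAIM (what is proved, stated in full; the proofs are below) =====
def Claim_equal_splitchans : Prop := ∀ (l : List (Int × List Int)), Dom_splitchans l → Pre_splitchans l → Spec_splitchans l (splitchans l)

-- ===== LEMMAS AND PROOFS =====

-- the common per-channel compression step, with an explicit "last note" component
def cstep (p : (List (Int × Int) × Int) × Int) (tn : Int × Int) : (List (Int × Int) × Int) × Int :=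
  ((if tn.2 ≠ p.1.2 then (p.1.1 ++ [(p.2 + tn.1, tn.2)], tn.2) else p.1), p.2 + tn.1)

-- A's inner fold equals the common fold once the last note is tracked explicitly
lemma foldA_eq (c : List (Int × Int)) : ∀ (r : List (Int × Int)) (last tacc : Int),
    r ≠ [] → (PySem.List.pyGetD r (-1) ((0:Int),(0:Int))).2 = last →
    c.foldl stepA (r, tacc) =
      ((c.foldl cstep ((r, last), tacc)).1.1, (c.foldl cstep ((r, last), tacc)).2) := by
  induction c with
  | nil => intro r last tacc _ _; simp
  | cons tn c ih =>
    intro r last tacc hr hlast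
    simp only [List.foldl_cons]
    by_cases h : tn.2 = last
    · have : stepA (r, tacc) tn = (r, tacc + tn.1) := by
        simp [stepA, hlast, h]
      rw [this]
      have : cstep ((r, last), tacc) tn = ((r, last), tacc + tn.1) := by
        simp [cstep, h]
      rw [this]
      exact ih r last (tacc + tn.1) hr hlast
    · have : stepA (r, tacc) tn = (r ++ [(tacc + tn.1, tn.2)], tacc + tn.1) := by
        simp [stepA, hlast, h]
      rw [this]
      have : cstep ((r, last), tacc) tn = ((r ++ [(tacc + tn.1, tn.2)], tn.2), tacc + tn.1) := by
        simp [cstep, h]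
      rw [this]
      exact ih _ tn.2 (tacc + tn.1) (by simp)
        (by rw [PySem.List.pyGetD_neg_one_append_singleton])

-- B's fold preserves the number of channels
lemma foldB_len (rest : List (Int × List Int)) :
    ∀ (chans : List (List (Int × Int) × Int)) (tacc : Int),
    (∀ row ∈ rest, chans.length ≤ row.2.length) →
    ((rest.foldl stepB (chans, tacc)).1).length = chans.length := by
  induction rest with
  | nil => intro chans tacc _; simp
  | cons row rest ih =>
    intro chans tacc hlen
    simp only [List.foldl_cons]
    have hz : (List.zipWith (fun c n => if n ≠ c.2 then (c.1 ++ [(tacc + row.1, n)], n) else c)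
        chans row.2).length = chans.length := by
      rw [List.length_zipWith]
      exact Nat.min_eq_left (hlen row (by simp))
    have : stepB (chans, tacc) row =
        (List.zipWith (fun c n => if n ≠ c.2 then (c.1 ++ [(tacc + row.1, n)], n) else c)
          chans row.2, tacc + row.1) := rfl
    rw [this, ih _ _ (by intro r hr; rw [hz]; exact hlen r (by simp [hr]))]
    exact hz

-- B's fold, restricted tacc one channel, is the common fold on that channel's projection
lemma foldB_elem (rest : List (Int × List Int)) :
    ∀ (chans : List (List (Int × Int) × Int)) (tacc : Int) (i : Nat), i < chans.length →
    (∀ row ∈ rest, chans.length ≤ row.2.length) →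
    ((rest.foldl stepB (chans, tacc)).1)[i]? =
      some ((rest.map (fun row => (row.1, row.2.getD i 0))).foldl cstep
        (chans.getD i ([], 0), tacc)).1 := by
  induction rest with
  | nil =>
    intro chans tacc i hi _
    simp [List.getD_eq_getElem?_getD, List.getElem?_eq_getElem hi]
  | cons row rest ih =>
    intro chans tacc i hi hlen
    have hrow : chans.length ≤ row.2.length := hlen row (by simp)
    simp only [List.foldl_cons, List.map_cons]
    have hz : (List.zipWith (fun c n => if n ≠ c.2 then (c.1 ++ [(tacc + row.1, n)], n) else c)
        chans row.2).length = chans.length := by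
      rw [List.length_zipWith]; exact Nat.min_eq_left hrow
    have hstep : stepB (chans, tacc) row =
        (List.zipWith (fun c n => if n ≠ c.2 then (c.1 ++ [(tacc + row.1, n)], n) else c)
          chans row.2, tacc + row.1) := rfl
    rw [hstep, ih _ _ i (by rw [hz]; exact hi)
      (by intro r hr; rw [hz]; exact hlen r (by simp [hr]))]
    congr 2
    · -- the zipWith entry at i is exactly one cstep on the projected row
      have hib : i < row.2.length := lt_of_lt_of_le hi hrow
      have hzi : i < (List.zipWith (fun c n => if n ≠ c.2 then (c.1 ++ [(tacc + row.1, n)], n) else c)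
          chans row.2).length := by rw [hz]; exact hi
      rw [List.getD_eq_getElem?_getD, List.getElem?_eq_getElem hzi,
        List.getElem_zipWith, List.getD_eq_getElem?_getD, List.getElem?_eq_getElem hi]
      simp [cstep, List.getD_eq_getElem?_getD, List.getElem?_eq_getElem hib]

-- ===== VERDICT (by name: the statement is the Claim_ definition above) =====
theorem splitchans_spec : Claim_equal_splitchans := by
  intro l _ hpre
  obtain ⟨hne, hlen⟩ := hpre
  cases l with
  | nil => exact absurd rfl hne
  | cons hd rest =>
    unfold Spec_splitchans splitchans splitchans_alt
    simp only [PySem.List.pyGetD_zero_cons, List.headD_cons, List.drop_one, List.tail_cons,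
      PySem.List.foldl_append_singleton_eq_map, List.nil_append, PySem.List.pyRange_zero_natCast,
      List.map_map]
    have hlen' : ∀ row ∈ rest, hd.2.length ≤ row.2.length := by
      intro row hr
      have := hlen row (by simp [hr])
      simpa using this
    have hinitlen : (hd.2.map (fun n => (([(hd.1, n)] : List (Int × Int)), n))).length = hd.2.length := by simp
    apply List.ext_getElem?
    intro i
    by_cases hi : i < hd.2.length
    · -- A side at i = B side at i: both reduce to the same per-channel cstep fold
      rw [List.getElem?_map, List.getElem?_range hi]
      rw [List.getElem?_map,
        foldB_elem rest _ 0 i (by rw [hinitlen]; exact hi) (by rw [hinitlen]; exact hlen')]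
      have hproj : (fun tm : Int × List Int => (tm.1, PySem.List.pyGetD tm.2 ((i : Nat) : Int) 0)) =
          (fun tm : Int × List Int => (tm.1, tm.2.getD i 0)) := by
        funext tm; rw [PySem.List.pyGetD_natCast]
      simp only [Function.comp, Option.map_some, hproj]
      rw [List.map_cons, PySem.List.pyGetD_zero_cons, PySem.List.slice_from_one, List.tail_cons]
      have hlast : (PySem.List.pyGetD [((hd.1, hd.2.getD i 0) : Int × Int)] (-1) ((0:Int),(0:Int))).2
          = hd.2.getD i 0 := by
        simpa using congrArg Prod.snd
          (PySem.List.pyGetD_neg_one_append_singleton ([] : List (Int × Int)) (hd.1, hd.2.getD i 0) (0, 0))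
      rw [foldA_eq _ _ (hd.2.getD i 0) 0 (by simp) hlast]
      have hinit : (hd.2.map (fun n => (([(hd.1, n)] : List (Int × Int)), n))).getD i ([], 0)
          = ([(hd.1, hd.2.getD i 0)], hd.2.getD i 0) := by
        rw [List.getD_eq_getElem?_getD, List.getElem?_map, List.getElem?_eq_getElem hi]
        simp [List.getD_eq_getElem?_getD, List.getElem?_eq_getElem hi]
      rw [hinit]
    · -- past the number of channels both sides are none
      rw [List.getElem?_eq_none, List.getElem?_eq_none]
      · rw [List.length_map, foldB_len rest _ 0 (by rw [hinitlen]; exact hlen'), hinitlen]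
        omega
      · simp; omega
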